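-- pv_equiv track=rewrite | github.com/anvix9/basis_research_agents | tools/eval_references.py | _author_match
-- ===== SOURCE A (Python) =====
-- def _author_match(source_authors: list[str], api_authors: list[str]) -> bool:
--     """Check if any author surname appears in both lists."""
--     def surnames(authors):
--         out = set()
--         for a in authors:
--             parts = a.strip().split()
--             if parts:
--                 out.add(parts[-1].lower())
--         return out
--
--     s1 = surnames(source_authors)
--     s2 = surnames(api_authors)
--     return bool(s1 & s2)
-- ===== SOURCE B (Python) =====
-- def _author_match(source_authors: list[str], api_authors: list[str]) -> bool:
--     """Check if any author surname appears in both lists."""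
--     def sorted_surnames(authors):
--         res = []
--         for a in authors:
--             parts = a.strip().split()
--             if parts:
--                 res.append(parts[-1].lower())
--         res.sort()
--         return res
--
--     xs = sorted_surnames(source_authors)
--     ys = sorted_surnames(api_authors)
--     i = j = 0
--     while i < len(xs) and j < len(ys):
--         if xs[i] < ys[j]:
--             i += 1
--         elif ys[j] < xs[i]:
--             j += 1
--         else:
--             return True
--     return False
-- ===== Notes on version B (the rewrite author's own statement) =====
-- stated objective: alternative
-- what changed: B sorts the two surname lists and detects a common surname with a two-pointer merge scan, instead of hashing both into sets and intersecting them.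
import Mathlib
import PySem

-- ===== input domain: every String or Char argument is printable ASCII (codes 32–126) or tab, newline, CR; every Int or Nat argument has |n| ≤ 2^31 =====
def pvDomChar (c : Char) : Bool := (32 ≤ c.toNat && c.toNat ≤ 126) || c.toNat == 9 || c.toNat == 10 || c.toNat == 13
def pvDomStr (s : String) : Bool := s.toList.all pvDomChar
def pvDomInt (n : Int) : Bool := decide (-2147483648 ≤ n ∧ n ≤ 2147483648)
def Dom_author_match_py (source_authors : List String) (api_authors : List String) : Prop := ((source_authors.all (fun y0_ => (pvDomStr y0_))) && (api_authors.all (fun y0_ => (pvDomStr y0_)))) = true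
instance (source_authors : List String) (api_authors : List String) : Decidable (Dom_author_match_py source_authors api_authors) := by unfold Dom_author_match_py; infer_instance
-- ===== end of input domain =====

-- B sorts the two surname lists and detects a common surname with a two-pointer merge
-- scan, instead of hashing both into sets and intersecting them (objective: alternative).

-- ===== PORT A =====
-- inner helper 'surnames' of A: fold over the authors, adding each stripped last token lowered;
-- 'parts[-1]' under the 'if parts:' guard is ported as getLastD "" (exact for nonempty parts)
def pvSurnamesA (authors : List String) : PySem.Set String :=
  authors.foldl (fun out a =>
    if (PySem.Str.split₀ (PySem.Str.strip a)).isEmpty then out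
    else PySem.Set.add out (PySem.Str.lower ((PySem.Str.split₀ (PySem.Str.strip a)).getLastD "")))
    PySem.Set.empty

def author_match_py (source_authors : List String) (api_authors : List String) : Bool :=
  let s1 := pvSurnamesA source_authors
  let s2 := pvSurnamesA api_authors
  !(PySem.Set.inter s1 s2).isEmpty

-- ===== PORT B =====
-- B's helper 'sorted_surnames': append each stripped last token lowered, then sort
def pvSortedSurnamesB (authors : List String) : List String :=
  PySem.List.sorted
    (authors.foldl (fun res a =>
      if (PySem.Str.split₀ (PySem.Str.strip a)).isEmpty then res
      else res ++ [PySem.Str.lower ((PySem.Str.split₀ (PySem.Str.strip a)).getLastD "")]) [])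
    (fun x => x) false

-- B's two-pointer while loop, as recursion on the two (sorted) lists
def pvMergeScan : List String → List String → Bool
  | x :: xs, y :: ys =>
    if x < y then pvMergeScan xs (y :: ys)
    else if y < x then pvMergeScan (x :: xs) ys
    else true
  | _, _ => false

def author_match_py_alt (source_authors : List String) (api_authors : List String) : Bool :=
  pvMergeScan (pvSortedSurnamesB source_authors) (pvSortedSurnamesB api_authors)

-- ===== PRECONDITION & SPEC =====
def Spec_author_match_py (source_authors : List String) (api_authors : List String) (out : Bool) : Prop := out = author_match_py_alt source_authors api_authors
instance (source_authors : List String) (api_authors : List String) (out : Bool) : Decidable (Spec_author_match_py source_authors api_authors out) := by unfold Spec_author_match_py; infer_instance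

-- ===== CLAIM (what is proved, stated in full; the proofs are below) =====
def Claim_equal_author_match_py : Prop := ∀ (source_authors : List String) (api_authors : List String), Dom_author_match_py source_authors api_authors → Spec_author_match_py source_authors api_authors (author_match_py source_authors api_authors)

-- ===== LEMMAS AND PROOFS =====

-- the surname of one entry (proof-side characterisation shared by both ports)
def pvSurname? (a : String) : Option String :=
  if (PySem.Str.split₀ (PySem.Str.strip a)).isEmpty then none
  else some (PySem.Str.lower ((PySem.Str.split₀ (PySem.Str.strip a)).getLastD ""))

theorem mem_pvSurnamesA_aux (l : List String) (init : PySem.Set String) (x : String) :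
    x ∈ l.foldl (fun out a =>
      if (PySem.Str.split₀ (PySem.Str.strip a)).isEmpty then out
      else PySem.Set.add out (PySem.Str.lower ((PySem.Str.split₀ (PySem.Str.strip a)).getLastD "")))
      init ↔ x ∈ init ∨ ∃ a ∈ l, pvSurname? a = some x := by
  induction l generalizing init with
  | nil => simp
  | cons a l ih =>
    rw [List.foldl_cons, ih]
    by_cases h : PySem.Str.split₀ (PySem.Str.strip a) = []
    · rw [if_pos (by simp [h])]
      simp only [List.mem_cons]
      constructor
      · rintro (hx | ⟨b, hb, hbx⟩)
        · exact Or.inl hx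
        · exact Or.inr ⟨b, Or.inr hb, hbx⟩
      · rintro (hx | ⟨b, (rfl | hb), hbx⟩)
        · exact Or.inl hx
        · rw [pvSurname?, if_pos (by simp [h])] at hbx
          exact absurd hbx (by simp)
        · exact Or.inr ⟨b, hb, hbx⟩
    · rw [if_neg (by simp [h])]
      simp only [List.mem_cons, PySem.Set.mem_add]
      constructor
      · rintro (⟨hx | rfl⟩ | ⟨b, hb, hbx⟩)
        · exact Or.inl hx
        · exact Or.inr ⟨a, Or.inl rfl, by rw [pvSurname?, if_neg (by simp [h])]⟩
        · exact Or.inr ⟨b, Or.inr hb, hbx⟩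
      · rintro (hx | ⟨b, (rfl | hb), hbx⟩)
        · exact Or.inl (Or.inl hx)
        · rw [pvSurname?, if_neg (by simp [h])] at hbx
          exact Or.inl (Or.inr (Option.some.inj hbx).symm)
        · exact Or.inr ⟨b, hb, hbx⟩

theorem mem_pvSurnamesA (l : List String) (x : String) :
    x ∈ pvSurnamesA l ↔ ∃ a ∈ l, pvSurname? a = some x := by
  unfold pvSurnamesA
  rw [mem_pvSurnamesA_aux]
  simp [PySem.Set.empty]

theorem not_isEmpty_iff_exists_mem {α : Type} (l : List α) :
    (!l.isEmpty) = true ↔ ∃ x, x ∈ l := by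
  cases l <;> simp

theorem author_match_py_iff (s t : List String) :
    author_match_py s t = true ↔
      ∃ x, (∃ a ∈ s, pvSurname? a = some x) ∧ ∃ b ∈ t, pvSurname? b = some x := by
  unfold author_match_py
  rw [not_isEmpty_iff_exists_mem]
  constructor
  · rintro ⟨x, hx⟩
    rw [PySem.Set.mem_inter] at hx
    exact ⟨x, (mem_pvSurnamesA s x).1 hx.1, (mem_pvSurnamesA t x).1 hx.2⟩
  · rintro ⟨x, hs, ht⟩
    refine ⟨x, ?_⟩
    rw [PySem.Set.mem_inter]
    exact ⟨(mem_pvSurnamesA s x).2 hs, (mem_pvSurnamesA t x).2 ht⟩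

theorem mem_foldl_app_aux (l : List String) (init : List String) (x : String) :
    x ∈ l.foldl (fun res a =>
      if (PySem.Str.split₀ (PySem.Str.strip a)).isEmpty then res
      else res ++ [PySem.Str.lower ((PySem.Str.split₀ (PySem.Str.strip a)).getLastD "")])
      init ↔ x ∈ init ∨ ∃ a ∈ l, pvSurname? a = some x := by
  induction l generalizing init with
  | nil => simp
  | cons a l ih =>
    rw [List.foldl_cons, ih]
    by_cases h : PySem.Str.split₀ (PySem.Str.strip a) = []
    · rw [if_pos (by simp [h])]
      constructor
      · rintro (hx | ⟨b, hb, hbx⟩)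
        · exact Or.inl hx
        · exact Or.inr ⟨b, List.mem_cons_of_mem _ hb, hbx⟩
      · rintro (hx | ⟨b, hb, hbx⟩)
        · exact Or.inl hx
        · rcases List.mem_cons.1 hb with rfl | hb'
          · rw [pvSurname?, if_pos (by simp [h])] at hbx
            exact absurd hbx (by simp)
          · exact Or.inr ⟨b, hb', hbx⟩
    · rw [if_neg (by simp [h])]
      simp only [List.mem_append, List.mem_singleton]
      constructor
      · rintro (⟨hx | rfl⟩ | ⟨b, hb, hbx⟩)
        · exact Or.inl hx
        · exact Or.inr ⟨a, List.mem_cons_self .., by rw [pvSurname?, if_neg (by simp [h])]⟩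
        · exact Or.inr ⟨b, List.mem_cons_of_mem _ hb, hbx⟩
      · rintro (hx | ⟨b, hb, hbx⟩)
        · exact Or.inl (Or.inl hx)
        · rcases List.mem_cons.1 hb with rfl | hb'
          · rw [pvSurname?, if_neg (by simp [h])] at hbx
            exact Or.inl (Or.inr (Option.some.inj hbx).symm)
          · exact Or.inr ⟨b, hb', hbx⟩

theorem mem_pvSortedSurnamesB (l : List String) (x : String) :
    x ∈ pvSortedSurnamesB l ↔ ∃ a ∈ l, pvSurname? a = some x := by
  unfold pvSortedSurnamesB
  rw [PySem.List.mem_sorted, mem_foldl_app_aux]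
  simp

theorem pvSortedSurnamesB_pairwise (l : List String) :
    (pvSortedSurnamesB l).Pairwise (· ≤ ·) := by
  unfold pvSortedSurnamesB
  exact PySem.List.sorted_pairwise _ _

theorem pvMergeScan_iff (xs ys : List String)
    (hxs : xs.Pairwise (· ≤ ·)) (hys : ys.Pairwise (· ≤ ·)) :
    pvMergeScan xs ys = true ↔ ∃ x, x ∈ xs ∧ x ∈ ys := by
  induction xs, ys using pvMergeScan.induct with
  | case1 x xs y ys hlt ih =>
    rw [pvMergeScan, if_pos hlt, ih (List.Pairwise.of_cons hxs) hys]
    constructor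
    · rintro ⟨z, hz1, hz2⟩
      exact ⟨z, List.mem_cons_of_mem _ hz1, hz2⟩
    · rintro ⟨z, hz1, hz2⟩
      rcases List.mem_cons.1 hz1 with rfl | hz1'
      · -- z = x ∈ y::ys but x < y ≤ every element of y::ys: contradiction
        rcases List.mem_cons.1 hz2 with rfl | hz2'
        · exact absurd hlt (lt_irrefl _)
        · have := (List.pairwise_cons.mp hys).1 _ hz2'
          exact absurd (lt_of_lt_of_le hlt this) (lt_irrefl _)
      · exact ⟨z, hz1', hz2⟩
  | case2 x xs y ys hlt hlt' ih =>
    rw [pvMergeScan, if_neg hlt, if_pos hlt', ih hxs (List.Pairwise.of_cons hys)]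
    constructor
    · rintro ⟨z, hz1, hz2⟩
      exact ⟨z, hz1, List.mem_cons_of_mem _ hz2⟩
    · rintro ⟨z, hz1, hz2⟩
      rcases List.mem_cons.1 hz2 with rfl | hz2'
      · rcases List.mem_cons.1 hz1 with rfl | hz1'
        · exact absurd hlt' (lt_irrefl _)
        · have := (List.pairwise_cons.mp hxs).1 _ hz1'
          exact absurd (lt_of_lt_of_le hlt' this) (lt_irrefl _)
      · exact ⟨z, hz1, hz2'⟩
  | case3 x xs y ys hlt hlt' =>
    have hxy : x = y := le_antisymm (le_of_not_gt hlt') (le_of_not_gt hlt)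
    subst hxy
    rw [pvMergeScan, if_neg hlt, if_neg hlt']
    simp only [true_iff]
    exact ⟨x, List.mem_cons_self .., List.mem_cons_self ..⟩
  | case4 xs ys h =>
    rw [pvMergeScan.eq_def]
    constructor
    · intro hfalse
      cases xs with
      | nil => exact absurd hfalse (by simp)
      | cons x xs' =>
        cases ys with
        | nil => exact absurd hfalse (by simp)
        | cons y ys' => exact (h x xs' y ys' rfl rfl).elim
    · rintro ⟨z, hz1, hz2⟩
      cases xs with
      | nil => exact absurd hz1 (by simp)
      | cons x xs' =>
        cases ys with
        | nil => exact absurd hz2 (by simp)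
        | cons y ys' => exact (h x xs' y ys' rfl rfl).elim

theorem author_match_py_alt_iff (s t : List String) :
    author_match_py_alt s t = true ↔
      ∃ x, (∃ a ∈ s, pvSurname? a = some x) ∧ ∃ b ∈ t, pvSurname? b = some x := by
  unfold author_match_py_alt
  rw [pvMergeScan_iff _ _ (pvSortedSurnamesB_pairwise s) (pvSortedSurnamesB_pairwise t)]
  constructor
  · rintro ⟨x, hx1, hx2⟩
    exact ⟨x, (mem_pvSortedSurnamesB s x).1 hx1, (mem_pvSortedSurnamesB t x).1 hx2⟩
  · rintro ⟨x, hs, ht⟩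
    exact ⟨x, (mem_pvSortedSurnamesB s x).2 hs, (mem_pvSortedSurnamesB t x).2 ht⟩

-- ===== VERDICT (by name: the statement is the Claim_ definition above) =====
theorem author_match_py_spec : Claim_equal_author_match_py := by
  intro s t _
  unfold Spec_author_match_py
  rw [Bool.eq_iff_iff, author_match_py_iff, author_match_py_alt_iff]
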